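-- pv_equiv track=rewrite | github.com/Walteriba/ProgramacionAvanzada-UNAB | Clase-N06-PA-AGen_NReinas.py | dibujo
-- ===== SOURCE A (Python) =====
-- def dibujo(tablero):
--     # Separamos las partes (esta rankeado)
--     tab = tablero[0]
--     ranking = tablero[1]
--     # genera el tablero
--     n = len(tab)
--     dibujo = []
--     for i in range(n):
--         dibujo.append(list("."*n))
--         for k in range(n):
--             if tab[k] - 1 == i:
--                 dibujo[i][k]="R"
--         dibujo[i]=" ".join(dibujo[i])
-- # ...R R... .R.. ..R.
-- # ...R
-- # R...
-- # .R..
-- # ..R.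
-- # fitness: 3
--     return "\n".join(dibujo)+"\nfitness: " + str(ranking)
-- ===== SOURCE B (Python) =====
-- def dibujo(tablero):
--     tab, ranking = tablero
--     n = len(tab)
--     grid = [["."] * n for _ in range(n)]
--     for k in range(n):
--         r = tab[k] - 1
--         if 0 <= r < n:
--             grid[r][k] = "R"
--     return "\n".join(" ".join(row) for row in grid) + "\nfitness: " + str(ranking)
-- ===== Notes on version B (the rewrite author's own statement) =====
-- stated objective: alternative
-- what changed: Instead of scanning all n columns for every row (nested loops), B builds the dot grid once and does a single pass over columns, placing each queen directly at grid[tab[k]-1][k] when that row index is in range.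
import Mathlib
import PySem

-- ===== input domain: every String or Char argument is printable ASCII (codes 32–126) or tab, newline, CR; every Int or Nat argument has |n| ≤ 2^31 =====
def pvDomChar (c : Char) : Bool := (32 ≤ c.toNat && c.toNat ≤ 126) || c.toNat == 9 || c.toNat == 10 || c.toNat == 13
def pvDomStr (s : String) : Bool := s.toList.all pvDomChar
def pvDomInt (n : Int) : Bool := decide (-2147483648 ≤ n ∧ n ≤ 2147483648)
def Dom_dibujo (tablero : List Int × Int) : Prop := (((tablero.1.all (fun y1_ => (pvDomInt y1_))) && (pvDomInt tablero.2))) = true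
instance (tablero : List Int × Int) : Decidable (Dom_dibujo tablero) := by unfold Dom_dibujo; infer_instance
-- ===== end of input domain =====

-- B replaces A's per-row scan of every column with one direct placement pass over the columns
-- (objective: alternative decomposition, same asymptotic cost).

-- ===== PORT A =====
-- one row of A's board: start from list("."*n), then the inner 'for k in range(n)' scan
-- (tab[k] with k < n = len(tab) is in range, so List.getD is exact here)
def dibujoRowA (tab : List Int) (n : Nat) (i : Nat) : List Char :=
  (List.range n).foldl
    (fun row k => if tab.getD k 0 - 1 = (i : Int) then row.set k 'R' else row)
    (List.replicate n '.')

def dibujo (tablero : List Int × Int) : String :=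
  let tab := tablero.1
  let ranking := tablero.2
  let n := tab.length
  let rows := (List.range n).map
    (fun i => PySem.Str.join " " ((dibujoRowA tab n i).map (fun c => String.ofList [c])))
  PySem.Str.join "\n" rows ++ "\nfitness: " ++ PySem.Int.toStr ranking

-- ===== PORT B =====
-- B's single placement pass over columns k (tab[k] exact via getD as above)
def placeStep (tab : List Int) (n : Nat) (g : List (List Char)) (k : Nat) : List (List Char) :=
  let r := tab.getD k 0 - 1
  if 0 ≤ r ∧ r < (n : Int) then g.set r.toNat ((g.getD r.toNat []).set k 'R') else g

def placeB (tab : List Int) (n : Nat) (g : List (List Char)) : List (List Char) :=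
  (List.range n).foldl (placeStep tab n) g

def dibujo_alt (tablero : List Int × Int) : String :=
  let tab := tablero.1
  let ranking := tablero.2
  let n := tab.length
  let grid := placeB tab n (List.replicate n (List.replicate n '.'))
  PySem.Str.join "\n" (grid.map (fun row => PySem.Str.join " " (row.map (fun c => String.ofList [c]))))
    ++ "\nfitness: " ++ PySem.Int.toStr ranking

-- ===== PRECONDITION & SPEC =====
def Spec_dibujo (tablero : List Int × Int) (out : String) : Prop := out = dibujo_alt tablero
instance (tablero : List Int × Int) (out : String) : Decidable (Spec_dibujo tablero out) := by unfold Spec_dibujo; infer_instance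

-- ===== CLAIM (what is proved, stated in full; the proofs are below) =====
def Claim_equal_dibujo : Prop := ∀ (tablero : List Int × Int), Dom_dibujo tablero → Spec_dibujo tablero (dibujo tablero)

-- ===== LEMMAS AND PROOFS =====

lemma getD_set_self (l : List (List Char)) (i k : Nat) :
    (l.set i ((l.getD i []).set k 'R')).getD i [] = (l.getD i []).set k 'R' := by
  by_cases h : i < l.length
  · simp [List.getD, h]
  · have hn : l[i]? = none := List.getElem?_eq_none (by omega)
    simp [List.getD, h]

lemma getD_set_ne (l : List (List Char)) (j i : Nat) (h : j ≠ i) (x : List Char) :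
    (l.set j x).getD i [] = l.getD i [] := by
  simp [List.getD, h]

-- row i of B's placement fold is exactly A's per-row fold on that row
lemma placeB_row (tab : List Int) (n : Nat) (ks : List Nat) (i : Nat) (hi : i < n)
    (g : List (List Char)) :
    ((ks.foldl (placeStep tab n) g).getD i [])
    = ks.foldl (fun row k => if tab.getD k 0 - 1 = (i : Int) then row.set k 'R' else row)
        (g.getD i []) := by
  induction ks generalizing g with
  | nil => rfl
  | cons k ks ih =>
    simp only [List.foldl_cons, placeStep]
    by_cases hc : 0 ≤ tab.getD k 0 - 1 ∧ tab.getD k 0 - 1 < (n : Int)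
    · rw [if_pos hc, ih]
      by_cases he : tab.getD k 0 - 1 = (i : Int)
      · rw [if_pos he]
        congr 1
        have hti : (tab.getD k 0 - 1).toNat = i := by omega
        rw [hti, getD_set_self]
      · rw [if_neg he]
        congr 1
        have hti : (tab.getD k 0 - 1).toNat ≠ i := by omega
        rw [getD_set_ne _ _ _ hti]
    · rw [if_neg hc, ih, if_neg (by intro h; exact hc ⟨by omega, by omega⟩)]

lemma placeB_length (tab : List Int) (n : Nat) (ks : List Nat) (g : List (List Char)) :
    (ks.foldl (placeStep tab n) g).length = g.length := by
  induction ks generalizing g with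
  | nil => rfl
  | cons k ks ih =>
    simp only [List.foldl_cons, placeStep]
    split
    · rw [ih]; simp
    · rw [ih]

lemma grid_eq (tab : List Int) (n : Nat) :
    placeB tab n (List.replicate n (List.replicate n '.'))
      = (List.range n).map (fun i => dibujoRowA tab n i) := by
  have hlen : (placeB tab n (List.replicate n (List.replicate n '.'))).length = n := by
    rw [placeB, placeB_length, List.length_replicate]
  apply List.ext_getElem
  · simp [hlen]
  · intro i h1 h2
    have hi : i < n := by simpa using h2
    have hrow := placeB_row tab n (List.range n) i hi (List.replicate n (List.replicate n '.'))
    simp only [placeB] at h1 ⊢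
    rw [List.getD_eq_getElem _ _ h1] at hrow
    simp only [List.getElem_map, List.getElem_range]
    rw [hrow, dibujoRowA]
    congr 1
    simp [List.getD, hi]

-- ===== VERDICT (by name: the statement is the Claim_ definition above) =====
theorem dibujo_spec : Claim_equal_dibujo := by
  intro tablero _
  unfold Spec_dibujo dibujo dibujo_alt
  simp only
  rw [grid_eq tablero.1 tablero.1.length, List.map_map]
  rfl
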